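-- pv_equiv track=rewrite | github.com/hieutran106/leetcode-ht | leetcode-python/no_fail/challenge_4.py | ferry_cost
-- ===== SOURCE A (Python) =====
-- from collections import defaultdict
-- import heapq
--
-- def ferry_cost(edges, n):
--     graph = defaultdict(list)
--     for source, destination, fee in edges:
--         graph[source].append((fee, destination))
--         graph[destination].append((fee, source))
--
--     visited = set()
--     mins = {0: 0}
--     q = [(0, 0)]
--     while q:
--         (cost, current_node) = heapq.heappop(q)
--         if current_node not in visited:
--             visited.add(current_node)
--             if current_node == n - 1:
--                 return cost
--
--             for c, next_node in graph.get(current_node, ()):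
--                 if next_node in visited:
--                     continue
--                 prev = mins.get(next_node, None)
--                 next = max(cost, c)
--                 condition = prev is None or next < prev
--                 if condition:
--                     mins[next_node] = next
--                     heapq.heappush(q, (next, next_node))
--
--
--     return -1
-- ===== SOURCE B (Python) =====
-- def ferry_cost(edges, n):
--     # Gauss-Seidel relaxation to a fixpoint: repeatedly relax every edge in both
--     # directions with cost = max(dist[u], fee) until nothing changes.
--     dist = {0: 0}
--     changed = True
--     while changed:
--         changed = False
--         for s, d, f in edges:
--             for u, v in ((s, d), (d, s)):
--                 if u in dist:
--                     nd = max(dist[u], f)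
--                     if v not in dist or nd < dist[v]:
--                         dist[v] = nd
--                         changed = True
--     return dist.get(n - 1, -1)
-- ===== Notes on version B (the rewrite author's own statement) =====
-- stated objective: alternative
-- what changed: Replaced the heap-based Dijkstra-with-visited-set minimax search by a Bellman-Ford-style relax-all-edges-until-fixpoint loop over a plain distance dict (no heap, no adjacency lists, no visited set).
import Mathlib
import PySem

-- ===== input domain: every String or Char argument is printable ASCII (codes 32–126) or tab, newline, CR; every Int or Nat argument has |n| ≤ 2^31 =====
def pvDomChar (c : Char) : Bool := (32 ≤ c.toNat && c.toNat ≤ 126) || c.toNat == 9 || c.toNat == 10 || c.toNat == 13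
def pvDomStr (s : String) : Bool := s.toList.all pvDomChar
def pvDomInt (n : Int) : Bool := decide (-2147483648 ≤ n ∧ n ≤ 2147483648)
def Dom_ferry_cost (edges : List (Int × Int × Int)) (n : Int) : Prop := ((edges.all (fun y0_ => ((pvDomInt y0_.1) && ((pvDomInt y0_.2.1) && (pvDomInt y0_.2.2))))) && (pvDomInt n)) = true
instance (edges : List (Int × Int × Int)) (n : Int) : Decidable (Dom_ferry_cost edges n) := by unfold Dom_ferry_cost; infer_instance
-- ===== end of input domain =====

-- B replaces A's heap-based minimax Dijkstra by a Bellman-Ford-style relax-until-fixpoint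
-- loop over a distance dict (objective: alternative; same return value, no speed claim).

-- ===== PORT A =====
-- graph[source].append((fee, destination)); graph[destination].append((fee, source))
def pvGraphAdd (g : PySem.Dict Int (List (Int × Int))) (k : Int) (p : Int × Int) :
    PySem.Dict Int (List (Int × Int)) := g.insert k (g.getD k [] ++ [p])

def pvBuildGraph (edges : List (Int × Int × Int)) : PySem.Dict Int (List (Int × Int)) :=
  edges.foldl (fun g e => pvGraphAdd (pvGraphAdd g e.1 (e.2.2, e.2.1)) e.2.1 (e.2.2, e.1))
    PySem.Dict.empty

-- the body of A's inner `for c, next_node in graph.get(current_node, ())` loop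
def pvRelaxA (cost : Int) (visited : PySem.Set Int)
    (st : List (Int × Int) × PySem.Dict Int Int) (p : Int × Int) :
    List (Int × Int) × PySem.Dict Int Int :=
  if visited.contains p.2 then st
  else
    let next := max cost p.1
    let cond : Bool := match st.2.get? p.2 with
      | none => true
      | some prev => decide (next < prev)
    if cond then (st.1 ++ [(next, p.2)], st.2.insert p.2 next) else st

-- A's `while q` loop; the heap q is modelled by its multiset of entries:
-- heappop returns the least (cost, node) pair, heappush appends.  The fuel is a
-- proved upper bound on the number of iterations (each pop either discards a
-- visited entry or strictly decreases a finite potential).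
def pvALoop (graph : PySem.Dict Int (List (Int × Int))) (n : Int) :
    Nat → List (Int × Int) → PySem.Set Int → PySem.Dict Int Int → Int
  | 0, _, _, _ => -1
  | fuel+1, q, visited, mins =>
    match PySem.List.min2? q (fun p => p.1) (fun p => p.2) with
    | none => -1
    | some cv =>
      let q1 := (PySem.List.remove? q cv).getD []
      if visited.contains cv.2 then pvALoop graph n fuel q1 visited mins
      else
        let visited1 := visited.add cv.2
        if cv.2 = n - 1 then cv.1
        else
          let st := (graph.getD cv.2 []).foldl (pvRelaxA cv.1 visited1) (q1, mins)
          pvALoop graph n fuel st.1 visited1 st.2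

def ferry_cost (edges : List (Int × Int × Int)) (n : Int) : Int :=
  let E := edges.length
  pvALoop (pvBuildGraph edges) n ((2*E+1)*(E+1)+2) [((0:Int), (0:Int))] PySem.Set.empty
    (PySem.Dict.ofList [((0:Int), (0:Int))])

-- ===== PORT B =====
-- one directed relaxation `if u in dist: nd = max(dist[u], f); ...`
def pvRelaxB (st : PySem.Dict Int Int × Bool) (u v f : Int) : PySem.Dict Int Int × Bool :=
  match st.1.get? u with
  | none => st
  | some du =>
    let nd := max du f
    match st.1.get? v with
    | none => (st.1.insert v nd, true)
    | some dv => if nd < dv then (st.1.insert v nd, true) else st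

-- one `for s, d, f in edges` pass (each edge relaxed in both directions)
def pvRoundB (edges : List (Int × Int × Int)) (dist : PySem.Dict Int Int) :
    PySem.Dict Int Int × Bool :=
  edges.foldl (fun st e => pvRelaxB (pvRelaxB st e.1 e.2.1 e.2.2) e.2.1 e.1 e.2.2) (dist, false)

-- the `while changed` loop; fuel is a proved bound on the number of changing rounds
def pvBLoop (edges : List (Int × Int × Int)) : Nat → PySem.Dict Int Int → PySem.Dict Int Int
  | 0, dist => dist
  | fuel+1, dist =>
    let st := pvRoundB edges dist
    if st.2 then pvBLoop edges fuel st.1 else st.1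

def ferry_cost_alt (edges : List (Int × Int × Int)) (n : Int) : Int :=
  let E := edges.length
  (pvBLoop edges ((2*E+1)*(E+1)+1) (PySem.Dict.ofList [((0:Int), (0:Int))])).getD (n-1) (-1)

-- ===== PRECONDITION & SPEC =====
def Spec_ferry_cost (edges : List (Int × Int × Int)) (n : Int) (out : Int) : Prop := out = ferry_cost_alt edges n
instance (edges : List (Int × Int × Int)) (n : Int) (out : Int) : Decidable (Spec_ferry_cost edges n out) := by unfold Spec_ferry_cost; infer_instance

-- ===== CLAIM (what is proved, stated in full; the proofs are below) =====
def Claim_equal_ferry_cost : Prop := ∀ (edges : List (Int × Int × Int)) (n : Int), Dom_ferry_cost edges n → Spec_ferry_cost edges n (ferry_cost edges n)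

-- ===== LEMMAS AND PROOFS =====

-- undirected adjacency and walks from node 0 with minimax cost (cost = max(0, fees))
def Adj (edges : List (Int × Int × Int)) (u v f : Int) : Prop :=
  (u, v, f) ∈ edges ∨ (v, u, f) ∈ edges

inductive W (edges : List (Int × Int × Int)) : Int → Int → Prop
  | zero : W edges 0 0
  | step {u c v f} : W edges u c → Adj edges u v f → W edges v (max c f)

-- the common characterisation both programs are proved to satisfy
def Answers (edges : List (Int × Int × Int)) (n : Int) (out : Int) : Prop :=
  (W edges (n-1) out ∧ ∀ c, W edges (n-1) c → out ≤ c) ∨ ((¬ ∃ c, W edges (n-1) c) ∧ out = -1)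

theorem W_nonneg {edges : List (Int × Int × Int)} {v c : Int} (h : W edges v c) : 0 ≤ c := by
  induction h with
  | zero => exact le_refl _
  | step _ _ ih => exact le_trans ih (le_max_left _ _)

theorem answers_unique {edges : List (Int × Int × Int)} {n a b : Int}
    (ha : Answers edges n a) (hb : Answers edges n b) : a = b := by
  rcases ha with ⟨hwa, hma⟩ | ⟨hna, ha1⟩ <;> rcases hb with ⟨hwb, hmb⟩ | ⟨hnb, hb1⟩
  · exact le_antisymm (hma _ hwb) (hmb _ hwa)
  · exact absurd ⟨a, hwa⟩ hnb
  · exact absurd ⟨b, hwb⟩ hna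
  · rw [ha1, hb1]


-- ----- finite value universe and potential -----

-- every cost occurring in either program is 0 or an edge fee
def Vals (edges : List (Int × Int × Int)) : List Int := 0 :: edges.map (fun e => e.2.2)

def rnk (edges : List (Int × Int × Int)) (c : Int) : Nat :=
  (Vals edges).countP (fun x => decide (x < c))

def cands (edges : List (Int × Int × Int)) : List Int :=
  PySem.Set.ofList (0 :: edges.flatMap (fun e => [e.1, e.2.1]))

def wgt (edges : List (Int × Int × Int)) (vis : PySem.Set Int) (mins : PySem.Dict Int Int)
    (x : Int) : Nat :=
  if x ∈ vis then 0 else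
    match mins.get? x with
    | none => edges.length + 1
    | some m => rnk edges m

def Phi (edges : List (Int × Int × Int)) (vis : PySem.Set Int) (mins : PySem.Dict Int Int) : Nat :=
  ((cands edges).map (wgt edges vis mins)).sum

theorem countP_lt_countP {α : Type} {p q : α → Bool} {l : List α} {a : α}
    (hpq : ∀ x, p x = true → q x = true) (ha : a ∈ l) (hqa : q a = true) (hpa : p a = false) :
    l.countP p < l.countP q := by
  induction l with
  | nil => simp at ha
  | cons b t ih =>
    rcases List.mem_cons.1 ha with rfl | hat
    · have := List.countP_mono_left (l := t) (fun x _ h => hpq x h)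
      simp [hqa, hpa]; omega
    · have := ih hat
      by_cases hb : p b = true
      · simp [hb, hpq b hb]; omega
      · simp at hb
        simp [List.countP_cons, hb]
        rcases hq : q b <;> simp <;> omega

theorem rnk_le (edges : List (Int × Int × Int)) (c : Int) : rnk edges c ≤ edges.length + 1 := by
  have := List.countP_le_length (p := fun x => decide (x < c)) (l := Vals edges)
  simpa [Vals] using this

theorem rnk_lt_top {edges : List (Int × Int × Int)} {c : Int} (hc : c ∈ Vals edges) :
    rnk edges c < edges.length + 1 := by
  have h := countP_lt_countP (l := Vals edges) (p := fun x => decide (x < c))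
    (q := fun _ => true) (a := c) (fun _ _ => rfl) hc rfl (by simp)
  have hlen : (Vals edges).countP (fun _ => true) = edges.length + 1 := by
    simp [List.countP_true, Vals]
  unfold rnk; omega

theorem rnk_lt_rnk {edges : List (Int × Int × Int)} {c' c : Int} (hc' : c' ∈ Vals edges)
    (h : c' < c) : rnk edges c' < rnk edges c := by
  exact countP_lt_countP (fun x hx => by simp at hx ⊢; omega) hc' (by simpa) (by simp)

theorem zero_mem_Vals (edges : List (Int × Int × Int)) : (0:Int) ∈ Vals edges := by
  simp [Vals]

theorem adj_fee_mem {edges : List (Int × Int × Int)} {u v f : Int} (h : Adj edges u v f) :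
    f ∈ Vals edges := by
  rcases h with h | h <;> exact List.mem_cons_of_mem _ (List.mem_map.2 ⟨_, h, rfl⟩)

theorem zero_mem_cands (edges : List (Int × Int × Int)) : (0:Int) ∈ cands edges := by
  simp [cands, PySem.Set.mem_ofList]

theorem adj_mem_cands {edges : List (Int × Int × Int)} {u v f : Int} (h : Adj edges u v f) :
    v ∈ cands edges := by
  unfold cands
  rw [PySem.Set.mem_ofList]
  rcases h with h | h
  · exact List.mem_cons_of_mem _ (List.mem_flatMap.2 ⟨_, h, by simp⟩)
  · exact List.mem_cons_of_mem _ (List.mem_flatMap.2 ⟨_, h, by simp⟩)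

theorem nodup_cands (edges : List (Int × Int × Int)) : (cands edges).Nodup :=
  PySem.Set.nodup_ofList _

theorem foldl_add_length {α : Type} [BEq α] :
    ∀ (xs : List α) (s : PySem.Set α), (xs.foldl PySem.Set.add s).length ≤ s.length + xs.length := by
  intro xs
  induction xs with
  | nil => intro s; simp
  | cons x t ih =>
    intro s
    have h1 : (PySem.Set.add s x).length ≤ s.length + 1 := by
      unfold PySem.Set.add; split <;> simp
    have := ih (PySem.Set.add s x)
    simp only [List.foldl_cons, List.length_cons]
    omega

theorem length_cands (edges : List (Int × Int × Int)) :
    (cands edges).length ≤ 2 * edges.length + 1 := by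
  have h1 : (cands edges).length ≤ (0 :: edges.flatMap (fun e => [e.1, e.2.1])).length := by
    have := foldl_add_length (0 :: edges.flatMap (fun e => [e.1, e.2.1])) PySem.Set.empty
    unfold cands
    rw [PySem.Set.ofList_eq_foldl]
    simpa [PySem.Set.empty] using this
  have h2 : (edges.flatMap (fun e => [e.1, e.2.1])).length = 2 * edges.length := by
    induction edges with
    | nil => simp
    | cons e t ih => simp [List.flatMap_cons] at ih ⊢; omega
  simp at h1
  omega

theorem wgt_le (edges : List (Int × Int × Int)) (vis : PySem.Set Int)
    (mins : PySem.Dict Int Int) (x : Int) : wgt edges vis mins x ≤ edges.length + 1 := by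
  unfold wgt
  split
  · omega
  · split
    · omega
    · exact rnk_le _ _

theorem Phi_le (edges : List (Int × Int × Int)) (vis : PySem.Set Int)
    (mins : PySem.Dict Int Int) : Phi edges vis mins ≤ (2 * edges.length + 1) * (edges.length + 1) := by
  have h1 : Phi edges vis mins ≤ (cands edges).length * (edges.length + 1) := by
    have := List.sum_le_card_nsmul ((cands edges).map (wgt edges vis mins)) (edges.length + 1)
      (by intro x hx; rcases List.mem_map.1 hx with ⟨y, _, rfl⟩; exact wgt_le _ _ _ _)
    simpa [Phi, smul_eq_mul] using this
  calc Phi edges vis mins ≤ (cands edges).length * (edges.length + 1) := h1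
    _ ≤ (2 * edges.length + 1) * (edges.length + 1) :=
        Nat.mul_le_mul_right _ (length_cands edges)

theorem sum_map_lt {α : Type} {f g : α → Nat} :
    ∀ {l : List α} {x : α}, l.Nodup → x ∈ l → f x < g x → (∀ y ∈ l, y ≠ x → f y ≤ g y) →
    (l.map f).sum < (l.map g).sum := by
  intro l
  induction l with
  | nil => intro x _ hx; simp at hx
  | cons a t ih =>
    intro x hnd hx hfg hle
    rcases List.nodup_cons.1 hnd with ⟨hat, hndt⟩
    rcases List.mem_cons.1 hx with rfl | hxt
    · have ht : (t.map f).sum ≤ (t.map g).sum :=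
        List.sum_le_sum (fun y hy => hle y (List.mem_cons_of_mem _ hy)
          (fun h => hat (h ▸ hy)))
      simp only [List.map_cons, List.sum_cons]
      omega
    · have ha : f a ≤ g a := hle a List.mem_cons_self (fun h => hat (h ▸ hxt))
      have := ih hndt hxt hfg (fun y hy hne => hle y (List.mem_cons_of_mem _ hy) hne)
      simp only [List.map_cons, List.sum_cons]
      omega

theorem Phi_insert_lt {edges : List (Int × Int × Int)} {vis : PySem.Set Int}
    {mins : PySem.Dict Int Int} {x next : Int} (hx : x ∈ cands edges) (hxv : x ∉ vis)
    (hnext : next ∈ Vals edges) (hold : ∀ m, mins.get? x = some m → next < m) :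
    Phi edges vis (mins.insert x next) < Phi edges vis mins := by
  apply sum_map_lt (nodup_cands edges) hx
  · unfold wgt
    rw [if_neg hxv, if_neg hxv, PySem.Dict.get?_insert_self]
    rcases hm : mins.get? x with _ | m
    · exact rnk_lt_top hnext
    · exact rnk_lt_rnk hnext (hold m hm)
  · intro y _ hne
    unfold wgt
    rw [PySem.Dict.get?_insert, if_neg hne]

theorem Phi_addvis_le (edges : List (Int × Int × Int)) (vis : PySem.Set Int)
    (mins : PySem.Dict Int Int) (v : Int) :
    Phi edges (PySem.Set.add vis v) mins ≤ Phi edges vis mins := by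
  apply List.sum_le_sum
  intro y _
  unfold wgt
  by_cases hy : y ∈ vis
  · rw [if_pos hy, if_pos ((PySem.Set.mem_add _ _ _).2 (Or.inl hy))]
  · rw [if_neg hy]
    split <;> omega

-- ----- the adjacency dict built by A -----

theorem mem_graphAdd {g : PySem.Dict Int (List (Int × Int))} {k : Int} {x p : Int × Int}
    {v : Int} : p ∈ (pvGraphAdd g k x).getD v [] ↔ p ∈ g.getD v [] ∨ (v = k ∧ p = x) := by
  unfold pvGraphAdd
  rw [PySem.Dict.getD_insert]
  split
  · rename_i h; subst h; simp
  · rename_i h; simp [h]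

theorem mem_buildGraph_fold :
    ∀ (l : List (Int × Int × Int)) (g : PySem.Dict Int (List (Int × Int))) (v : Int)
      (p : Int × Int),
      p ∈ (l.foldl (fun g e => pvGraphAdd (pvGraphAdd g e.1 (e.2.2, e.2.1)) e.2.1 (e.2.2, e.1)) g).getD v []
        ↔ p ∈ g.getD v [] ∨ (v, p.2, p.1) ∈ l ∨ (p.2, v, p.1) ∈ l := by
  intro l
  induction l with
  | nil => intro g v p; simp
  | cons e t ih =>
    intro g v p
    obtain ⟨e1, e2, e3⟩ := e
    rw [List.foldl_cons, ih, mem_graphAdd, mem_graphAdd]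
    simp only [List.mem_cons, Prod.ext_iff]
    constructor
    · rintro (((h | ⟨h1, h2⟩) | ⟨h1, h2⟩) | h | h) <;> tauto
    · rintro (h | (⟨h1, h2, h3⟩ | h) | (⟨h1, h2, h3⟩ | h)) <;> tauto

theorem mem_graph {edges : List (Int × Int × Int)} {v : Int} {p : Int × Int} :
    p ∈ (pvBuildGraph edges).getD v [] ↔ Adj edges v p.2 p.1 := by
  unfold pvBuildGraph Adj
  rw [mem_buildGraph_fold]
  simp [PySem.Dict.getD_empty]


-- ----- correctness of B (relax-until-fixpoint) -----

structure InvB (edges : List (Int × Int × Int)) (dist : PySem.Dict Int Int) : Prop where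
  dW : ∀ x m, dist.get? x = some m → W edges x m
  dV : ∀ x m, dist.get? x = some m → m ∈ Vals edges
  dzero : dist.get? 0 = some 0

def EdgeOK (dist : PySem.Dict Int Int) (u v f : Int) : Prop :=
  ∀ du, dist.get? u = some du → ∃ m, dist.get? v = some m ∧ m ≤ max du f

def PhiB (edges : List (Int × Int × Int)) (dist : PySem.Dict Int Int) : Nat :=
  Phi edges PySem.Set.empty dist

def FixOK (edges : List (Int × Int × Int)) (dist : PySem.Dict Int Int) : Prop :=
  ∀ e ∈ edges, EdgeOK dist e.1 e.2.1 e.2.2 ∧ EdgeOK dist e.2.1 e.1 e.2.2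

theorem insertB_inv {edges : List (Int × Int × Int)} {dist : PySem.Dict Int Int} {v nd : Int}
    (hInv : InvB edges dist) (hW : W edges v nd) (hV : nd ∈ Vals edges) (hv0 : v ≠ 0) :
    InvB edges (dist.insert v nd) := by
  constructor
  · intro x m hm
    rw [PySem.Dict.get?_insert] at hm
    split at hm
    · rename_i h; cases hm; rw [h]; exact hW
    · exact hInv.dW x m hm
  · intro x m hm
    rw [PySem.Dict.get?_insert] at hm
    split at hm
    · cases hm; exact hV
    · exact hInv.dV x m hm
  · rw [PySem.Dict.get?_insert, if_neg (by omega : (0:Int) ≠ v)]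
    exact hInv.dzero

theorem relaxB_spec {edges : List (Int × Int × Int)} {u v f : Int}
    (st : PySem.Dict Int Int × Bool) (hInv : InvB edges st.1) (hadj : Adj edges u v f) :
    (pvRelaxB st u v f = st ∧ EdgeOK st.1 u v f) ∨
    ((pvRelaxB st u v f).2 = true ∧ InvB edges (pvRelaxB st u v f).1 ∧
      PhiB edges (pvRelaxB st u v f).1 < PhiB edges st.1) := by
  rcases hu : st.1.get? u with _ | du
  · left
    refine ⟨by simp only [pvRelaxB, hu], ?_⟩
    intro du hdu; rw [hu] at hdu; cases hdu
  · have hWu : W edges u du := hInv.dW u du hu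
    have hdu0 : 0 ≤ du := W_nonneg hWu
    have hnd : max du f ∈ Vals edges := by
      rcases max_choice du f with h | h <;> rw [h]
      · exact hInv.dV u du hu
      · exact adj_fee_mem hadj
    have hWnd : W edges v (max du f) := W.step hWu hadj
    have hphi : ∀ (h : ∀ m, st.1.get? v = some m → max du f < m),
        PhiB edges (st.1.insert v (max du f)) < PhiB edges st.1 := by
      intro h
      exact Phi_insert_lt (adj_mem_cands hadj) (by simp [PySem.Set.empty]) hnd h
    rcases hv : st.1.get? v with _ | dv
    · right
      have hv0 : v ≠ 0 := by
        intro h; rw [h, hInv.dzero] at hv; cases hv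
      have hstep : pvRelaxB st u v f = (st.1.insert v (max du f), true) := by
        simp only [pvRelaxB, hu, hv]
      rw [hstep]
      exact ⟨rfl, insertB_inv hInv hWnd hnd hv0,
        hphi (by intro m hm; rw [hv] at hm; cases hm)⟩
    · by_cases hlt : max du f < dv
      · right
        have hv0 : v ≠ 0 := by
          intro h
          rw [h, hInv.dzero] at hv
          cases hv
          omega
        have hstep : pvRelaxB st u v f = (st.1.insert v (max du f), true) := by
          simp only [pvRelaxB, hu, hv, if_pos hlt]
        rw [hstep]
        exact ⟨rfl, insertB_inv hInv hWnd hnd hv0,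
          hphi (by intro m hm; rw [hv] at hm; cases hm; exact hlt)⟩
      · left
        refine ⟨by simp only [pvRelaxB, hu, hv, if_neg hlt], ?_⟩
        intro du' hdu'
        rw [hu] at hdu'
        cases hdu'
        exact ⟨dv, hv, by omega⟩

theorem relaxB_flag {u v f : Int} (st : PySem.Dict Int Int × Bool) (h : st.2 = true) :
    (pvRelaxB st u v f).2 = true := by
  rcases hu : st.1.get? u with _ | du
  · simpa only [pvRelaxB, hu]
  · rcases hv : st.1.get? v with _ | dv
    · simp only [pvRelaxB, hu, hv]
    · by_cases hlt : max du f < dv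
      · simp only [pvRelaxB, hu, hv, if_pos hlt]
      · simpa only [pvRelaxB, hu, hv, if_neg hlt]

theorem roundB_flag (l : List (Int × Int × Int)) :
    ∀ (st : PySem.Dict Int Int × Bool), st.2 = true →
    (l.foldl (fun st e => pvRelaxB (pvRelaxB st e.1 e.2.1 e.2.2) e.2.1 e.1 e.2.2) st).2 = true := by
  induction l with
  | nil => intro st h; exact h
  | cons e t ih =>
    intro st h
    exact ih _ (relaxB_flag _ (relaxB_flag _ h))

theorem roundB_fold {edges : List (Int × Int × Int)} :
    ∀ (l : List (Int × Int × Int)) (st : PySem.Dict Int Int × Bool),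
    (∀ e ∈ l, e ∈ edges) → InvB edges st.1 →
    (InvB edges (l.foldl (fun st e => pvRelaxB (pvRelaxB st e.1 e.2.1 e.2.2) e.2.1 e.1 e.2.2) st).1 ∧
     PhiB edges (l.foldl (fun st e => pvRelaxB (pvRelaxB st e.1 e.2.1 e.2.2) e.2.1 e.1 e.2.2) st).1 ≤ PhiB edges st.1) ∧
    ((l.foldl (fun st e => pvRelaxB (pvRelaxB st e.1 e.2.1 e.2.2) e.2.1 e.1 e.2.2) st).2 = false →
      (l.foldl (fun st e => pvRelaxB (pvRelaxB st e.1 e.2.1 e.2.2) e.2.1 e.1 e.2.2) st) = st ∧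
      ∀ e ∈ l, EdgeOK st.1 e.1 e.2.1 e.2.2 ∧ EdgeOK st.1 e.2.1 e.1 e.2.2) ∧
    (st.2 = false →
      (l.foldl (fun st e => pvRelaxB (pvRelaxB st e.1 e.2.1 e.2.2) e.2.1 e.1 e.2.2) st).2 = true →
      PhiB edges (l.foldl (fun st e => pvRelaxB (pvRelaxB st e.1 e.2.1 e.2.2) e.2.1 e.1 e.2.2) st).1 < PhiB edges st.1) := by
  intro l
  induction l with
  | nil =>
    intro st _ hInv
    refine ⟨⟨hInv, le_refl _⟩, fun _ => ⟨rfl, by simp⟩, fun h1 h2 => ?_⟩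
    simp only [List.foldl_nil] at h2
    rw [h1] at h2; cases h2
  | cons e t ih =>
    intro st hmem hInv
    have he : e ∈ edges := hmem e List.mem_cons_self
    have hadj1 : Adj edges e.1 e.2.1 e.2.2 := Or.inl (by simpa using he)
    have hadj2 : Adj edges e.2.1 e.1 e.2.2 := Or.inr (by simpa using he)
    have hone :
        ((pvRelaxB (pvRelaxB st e.1 e.2.1 e.2.2) e.2.1 e.1 e.2.2) = st ∧
          EdgeOK st.1 e.1 e.2.1 e.2.2 ∧ EdgeOK st.1 e.2.1 e.1 e.2.2) ∨
        ((pvRelaxB (pvRelaxB st e.1 e.2.1 e.2.2) e.2.1 e.1 e.2.2).2 = true ∧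
          InvB edges (pvRelaxB (pvRelaxB st e.1 e.2.1 e.2.2) e.2.1 e.1 e.2.2).1 ∧
          PhiB edges (pvRelaxB (pvRelaxB st e.1 e.2.1 e.2.2) e.2.1 e.1 e.2.2).1 < PhiB edges st.1) := by
      rcases relaxB_spec st hInv hadj1 with ⟨hid1, hok1⟩ | ⟨hf1, hInv1, hlt1⟩
      · rw [hid1]
        rcases relaxB_spec st hInv hadj2 with ⟨hid2, hok2⟩ | ⟨hf2, hInv2, hlt2⟩
        · exact Or.inl ⟨hid2, hok1, hok2⟩
        · exact Or.inr ⟨hf2, hInv2, hlt2⟩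
      · rcases relaxB_spec _ hInv1 hadj2 with ⟨hid2, hok2⟩ | ⟨hf2, hInv2, hlt2⟩
        · rw [hid2]
          exact Or.inr ⟨hf1, hInv1, hlt1⟩
        · exact Or.inr ⟨hf2, hInv2, lt_trans hlt2 hlt1⟩
    simp only [List.foldl_cons]
    rcases hone with ⟨hid, hok1, hok2⟩ | ⟨hf, hInv1, hlt⟩
    · rw [hid]
      obtain ⟨⟨hI, hP⟩, hfalse, hstrict⟩ := ih st (fun x hx => hmem x (List.mem_cons_of_mem _ hx)) hInv
      refine ⟨⟨hI, hP⟩, fun h => ?_, hstrict⟩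
      obtain ⟨h1, h2⟩ := hfalse h
      exact ⟨h1, by
        intro x hx
        rcases List.mem_cons.1 hx with rfl | hx
        · exact ⟨hok1, hok2⟩
        · exact h2 x hx⟩
    · obtain ⟨⟨hI, hP⟩, _, _⟩ := ih _ (fun x hx => hmem x (List.mem_cons_of_mem _ hx)) hInv1
      have hflag := roundB_flag t _ hf
      refine ⟨⟨hI, le_trans hP (le_of_lt hlt)⟩, fun h => ?_, fun _ _ => lt_of_le_of_lt hP hlt⟩
      rw [hflag] at h; cases h

theorem bLoop_spec {edges : List (Int × Int × Int)} :
    ∀ (fuel : Nat) (dist : PySem.Dict Int Int), InvB edges dist → PhiB edges dist < fuel →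
    InvB edges (pvBLoop edges fuel dist) ∧ FixOK edges (pvBLoop edges fuel dist) := by
  intro fuel
  induction fuel with
  | zero => intro dist _ h; omega
  | succ k ih =>
    intro dist hInv hφ
    obtain ⟨⟨hI, hP⟩, hfalse, hstrict⟩ :=
      roundB_fold (edges := edges) edges (dist, false) (fun _ h => h) hInv
    simp only [pvBLoop]
    cases hflag : (pvRoundB edges dist).2 with
    | false =>
      simp only [Bool.false_eq_true, if_false]
      obtain ⟨h1, h2⟩ := hfalse (by simpa [pvRoundB] using hflag)
      have hd : (pvRoundB edges dist).1 = dist := by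
        have : pvRoundB edges dist = (dist, false) := by simpa [pvRoundB] using h1
        rw [this]
      rw [hd]
      exact ⟨hInv, h2⟩
    | true =>
      simp only [if_true]
      have hlt : PhiB edges (pvRoundB edges dist).1 < PhiB edges dist :=
        hstrict rfl (by simpa [pvRoundB] using hflag)
      exact ih _ (by simpa [pvRoundB] using hI) (by omega)

theorem fix_lb {edges : List (Int × Int × Int)} {dist : PySem.Dict Int Int}
    (hfix : FixOK edges dist) (h0 : dist.get? 0 = some 0) :
    ∀ {v c : Int}, W edges v c → ∃ m, dist.get? v = some m ∧ m ≤ c := by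
  intro v c hW
  induction hW with
  | zero => exact ⟨0, h0, le_refl _⟩
  | @step u c' v' f hWu hadj ih =>
    obtain ⟨mu, hmu, hmule⟩ := ih
    have hmax : max mu f ≤ max c' f := max_le_max hmule (le_refl f)
    rcases hadj with h | h
    · obtain ⟨m, hm, hle⟩ := (hfix _ h).1 mu hmu
      exact ⟨m, hm, le_trans hle hmax⟩
    · obtain ⟨m, hm, hle⟩ := (hfix _ h).2 mu hmu
      exact ⟨m, hm, le_trans hle hmax⟩

theorem dict_init_get? (x : Int) :
    (PySem.Dict.ofList [((0:Int), (0:Int))]).get? x = if x = 0 then some 0 else none := by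
  have h : PySem.Dict.ofList [((0:Int), (0:Int))] = PySem.Dict.empty.insert 0 0 := rfl
  rw [h, PySem.Dict.get?_insert]
  split
  · rfl
  · exact PySem.Dict.get?_empty _

theorem initB_inv (edges : List (Int × Int × Int)) :
    InvB edges (PySem.Dict.ofList [((0:Int), (0:Int))]) := by
  constructor
  · intro x m hm
    rw [dict_init_get?] at hm
    split at hm
    · rename_i h; cases hm; rw [h]; exact W.zero
    · cases hm
  · intro x m hm
    rw [dict_init_get?] at hm
    split at hm
    · cases hm; exact zero_mem_Vals edges
    · cases hm
  · rw [dict_init_get?, if_pos rfl]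

theorem ferry_cost_alt_answers (edges : List (Int × Int × Int)) (n : Int) :
    Answers edges n (ferry_cost_alt edges n) := by
  have hφ : PhiB edges (PySem.Dict.ofList [((0:Int), (0:Int))]) <
      (2 * edges.length + 1) * (edges.length + 1) + 1 := by
    have := Phi_le edges PySem.Set.empty (PySem.Dict.ofList [((0:Int), (0:Int))])
    unfold PhiB
    omega
  obtain ⟨hI, hfix⟩ := bLoop_spec ((2 * edges.length + 1) * (edges.length + 1) + 1)
    (PySem.Dict.ofList [((0:Int), (0:Int))]) (initB_inv edges) hφ
  have hout : ferry_cost_alt edges n =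
      (pvBLoop edges ((2 * edges.length + 1) * (edges.length + 1) + 1)
        (PySem.Dict.ofList [((0:Int), (0:Int))])).getD (n-1) (-1) := rfl
  rw [hout]
  by_cases hreach : ∃ c, W edges (n-1) c
  · obtain ⟨c0, hc0⟩ := hreach
    obtain ⟨m, hm, _⟩ := fix_lb hfix hI.dzero hc0
    left
    rw [PySem.Dict.getD_eq_get?_getD, hm]
    refine ⟨hI.dW _ _ hm, ?_⟩
    intro c hc
    obtain ⟨m', hm', hle⟩ := fix_lb hfix hI.dzero hc
    rw [hm] at hm'
    cases hm'
    simpa using hle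
  · right
    refine ⟨hreach, ?_⟩
    rcases hg : (pvBLoop edges ((2 * edges.length + 1) * (edges.length + 1) + 1)
        (PySem.Dict.ofList [((0:Int), (0:Int))])).get? (n-1) with _ | m
    · rw [PySem.Dict.getD_eq_get?_getD, hg]; rfl
    · exact absurd ⟨m, hI.dW _ _ hg⟩ hreach


-- ----- correctness of A (heap Dijkstra for minimax) -----

theorem minfold_go {f : Option (Int × Int) → (Int × Int) → Option (Int × Int)}
    (hsel : ∀ m x, f (some m) x = some x ∨ f (some m) x = some m)
    (hxle : ∀ m x, f (some m) x = some x → x.1 ≤ m.1)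
    (hmle : ∀ m x, f (some m) x = some m → m.1 ≤ x.1) :
    ∀ (t : List (Int × Int)) (m : Int × Int),
    ∃ m', t.foldl f (some m) = some m' ∧ (m' = m ∨ m' ∈ t) ∧ m'.1 ≤ m.1 ∧
      ∀ p ∈ t, m'.1 ≤ p.1 := by
  intro t
  induction t with
  | nil => intro m; exact ⟨m, rfl, Or.inl rfl, le_refl _, by simp⟩
  | cons a t ih =>
    intro m
    simp only [List.foldl_cons]
    rcases hsel m a with hc | hc <;> rw [hc]
    · obtain ⟨m', h1, h2, h3, h4⟩ := ih a
      have ham : a.1 ≤ m.1 := hxle m a hc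
      refine ⟨m', h1, ?_, by omega, ?_⟩
      · rcases h2 with rfl | h2
        · exact Or.inr List.mem_cons_self
        · exact Or.inr (List.mem_cons_of_mem _ h2)
      · intro p hp
        rcases List.mem_cons.1 hp with rfl | hp
        · omega
        · exact h4 p hp
    · obtain ⟨m', h1, h2, h3, h4⟩ := ih m
      have ham : m.1 ≤ a.1 := hmle m a hc
      refine ⟨m', h1, ?_, h3, ?_⟩
      · rcases h2 with rfl | h2
        · exact Or.inl rfl
        · exact Or.inr (List.mem_cons_of_mem _ h2)
      · intro p hp
        rcases List.mem_cons.1 hp with rfl | hp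
        · omega
        · exact h4 p hp

theorem minfold_spec {f : Option (Int × Int) → (Int × Int) → Option (Int × Int)}
    (hnone : ∀ x, f none x = some x)
    (hsel : ∀ m x, f (some m) x = some x ∨ f (some m) x = some m)
    (hxle : ∀ m x, f (some m) x = some x → x.1 ≤ m.1)
    (hmle : ∀ m x, f (some m) x = some m → m.1 ≤ x.1) (q : List (Int × Int)) :
    (q.foldl f none = none → q = []) ∧
    (∀ cv, q.foldl f none = some cv → cv ∈ q ∧ ∀ p ∈ q, cv.1 ≤ p.1) := by
  cases q with
  | nil => exact ⟨fun _ => rfl, fun cv h => by cases h⟩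
  | cons x t =>
    obtain ⟨m', h1, h2, h3, h4⟩ := minfold_go hsel hxle hmle t x
    have he : (x :: t).foldl f none = some m' := by
      rw [List.foldl_cons, hnone, h1]
    refine ⟨fun h => ?_, fun cv h => ?_⟩
    · rw [he] at h; cases h
    rw [he] at h
    cases h
    constructor
    · rcases h2 with rfl | h2
      · exact List.mem_cons_self
      · exact List.mem_cons_of_mem _ h2
    · intro p hp
      rcases List.mem_cons.1 hp with rfl | hp
      · exact h3
      · exact h4 p hp

theorem min2?_props (q : List (Int × Int)) :
    (PySem.List.min2? q (fun p => p.1) (fun p => p.2) = none → q = []) ∧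
    (∀ cv, PySem.List.min2? q (fun p => p.1) (fun p => p.2) = some cv →
      cv ∈ q ∧ ∀ p ∈ q, cv.1 ≤ p.1) := by
  unfold PySem.List.min2?
  apply minfold_spec
  · intro x; rfl
  · intro m x
    dsimp only
    split
    · exact Or.inl rfl
    · exact Or.inr rfl
  · intro m x
    dsimp only
    split
    · rename_i hc
      intro _
      simp only [Bool.or_eq_true, Bool.and_eq_true, Bool.not_eq_true', decide_eq_true_eq,
        decide_eq_false_iff_not] at hc
      omega
    · intro h
      cases h
      exact le_refl _
  · intro m x
    dsimp only
    split
    · intro h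
      cases h
      exact le_refl _
    · rename_i hc
      intro _
      simp only [Bool.or_eq_true, Bool.and_eq_true, Bool.not_eq_true', decide_eq_true_eq,
        decide_eq_false_iff_not] at hc
      omega

theorem remove?_erase {q : List (Int × Int)} {cv : Int × Int} (h : cv ∈ q) :
    (PySem.List.remove? q cv).getD [] = q.erase cv := by
  rcases hio : List.idxOf? cv q with _ | i
  · exact absurd (List.idxOf?_eq_none_iff.1 hio) (by simpa using h)
  · have : PySem.List.remove? q cv = some (q.eraseIdx i) := by
      unfold PySem.List.remove?
      rw [hio]
      rfl
    rw [this, List.erase_eq_eraseIdx, hio]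
    rfl

structure InvA (edges : List (Int × Int × Int)) (n : Int) (q : List (Int × Int))
    (vis : PySem.Set Int) (mins : PySem.Dict Int Int) : Prop where
  qW : ∀ p ∈ q, W edges p.2 p.1
  qV : ∀ p ∈ q, p.1 ∈ Vals edges
  qC : ∀ p ∈ q, p.2 ∈ cands edges
  mW : ∀ x m, mins.get? x = some m → W edges x m
  mV : ∀ x m, mins.get? x = some m → m ∈ Vals edges
  curr : ∀ x m, x ∉ vis → mins.get? x = some m → (m, x) ∈ q
  visW : ∀ u ∈ vis, ∃ du, W edges u du ∧ (∀ c, W edges u c → du ≤ c) ∧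
      (∀ x f, Adj edges u x f → x ∈ vis ∨ ∃ m, mins.get? x = some m ∧ m ≤ max du f)
  start : (0:Int) ∈ vis ∨ mins.get? 0 = some 0
  tgt : (n-1) ∉ vis

theorem covering {edges : List (Int × Int × Int)} {n : Int} {q : List (Int × Int)}
    {vis : PySem.Set Int} {mins : PySem.Dict Int Int} (inv : InvA edges n q vis mins) :
    ∀ {w c : Int}, W edges w c →
      w ∈ vis ∨ ∃ x m, x ∉ vis ∧ mins.get? x = some m ∧ m ≤ c := by
  intro w c hW
  induction hW with
  | zero =>
    rcases inv.start with h | h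
    · exact Or.inl h
    · by_cases h0 : (0:Int) ∈ vis
      · exact Or.inl h0
      · exact Or.inr ⟨0, 0, h0, h, le_refl _⟩
  | @step u c' v' f hWu hadj ih =>
    rcases ih with hu | ⟨x, m, hx, hgm, hmle⟩
    · obtain ⟨du, hdu, hdumin, hadjok⟩ := inv.visW u hu
      have hduc : du ≤ c' := hdumin c' hWu
      rcases hadjok v' f hadj with hv | ⟨m, hgm, hmle⟩
      · exact Or.inl hv
      · by_cases hvv : v' ∈ vis
        · exact Or.inl hvv
        · exact Or.inr ⟨v', m, hvv, hgm, le_trans hmle (max_le_max hduc (le_refl f))⟩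
    · exact Or.inr ⟨x, m, hx, hgm, le_trans hmle (le_max_left _ _)⟩

theorem no_walk {edges : List (Int × Int × Int)} {n : Int} {vis : PySem.Set Int}
    {mins : PySem.Dict Int Int} (inv : InvA edges n [] vis mins) :
    ¬ ∃ c, W edges (n-1) c := by
  rintro ⟨c, hc⟩
  rcases covering inv hc with h | ⟨x, m, hx, hgm, _⟩
  · exact inv.tgt h
  · exact absurd (inv.curr x m hx hgm) (List.not_mem_nil)


structure RInv (edges : List (Int × Int × Int)) (vis1 : PySem.Set Int)
    (q : List (Int × Int)) (mins : PySem.Dict Int Int) : Prop where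
  qW : ∀ p ∈ q, W edges p.2 p.1
  qV : ∀ p ∈ q, p.1 ∈ Vals edges
  qC : ∀ p ∈ q, p.2 ∈ cands edges
  mW : ∀ x m, mins.get? x = some m → W edges x m
  mV : ∀ x m, mins.get? x = some m → m ∈ Vals edges
  curr : ∀ x m, x ∉ vis1 → mins.get? x = some m → (m, x) ∈ q

theorem relaxA_step {cost : Int} {vis1 : PySem.Set Int}
    (q : List (Int × Int)) (mins : PySem.Dict Int Int) (p : Int × Int) :
    (pvRelaxA cost vis1 (q, mins) p = (q, mins) ∧
      (p.2 ∈ vis1 ∨ ∃ m, mins.get? p.2 = some m ∧ m ≤ max cost p.1)) ∨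
    (pvRelaxA cost vis1 (q, mins) p =
        (q ++ [(max cost p.1, p.2)], mins.insert p.2 (max cost p.1)) ∧
      p.2 ∉ vis1 ∧ (∀ m, mins.get? p.2 = some m → max cost p.1 < m)) := by
  cases hv : PySem.Set.contains vis1 p.2 with
  | true =>
    left
    exact ⟨by simp only [pvRelaxA, hv, if_true], Or.inl ((PySem.Set.contains_iff _ _).1 hv)⟩
  | false =>
    have hnot : p.2 ∉ vis1 := by
      intro hmem
      rw [(PySem.Set.contains_iff _ _).2 hmem] at hv
      cases hv
    rcases hm : mins.get? p.2 with _ | prev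
    · right
      refine ⟨?_, hnot, fun m hm' => by cases hm'⟩
      simp only [pvRelaxA, hv, hm, Bool.false_eq_true, if_false, if_true]
    · by_cases hlt : max cost p.1 < prev
      · right
        refine ⟨?_, hnot, fun m hm' => by cases hm'; exact hlt⟩
        simp only [pvRelaxA, hv, hm, Bool.false_eq_true, if_false, decide_eq_true_eq,
          if_pos hlt]
      · left
        refine ⟨?_, Or.inr ⟨prev, rfl, by omega⟩⟩
        simp only [pvRelaxA, hv, hm, Bool.false_eq_true, if_false, decide_eq_true_eq,
          if_neg hlt]

theorem relaxA_fold {edges : List (Int × Int × Int)} {v cost : Int} {vis1 : PySem.Set Int}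
    (hWv : W edges v cost) (hcostV : cost ∈ Vals edges) :
    ∀ (adj : List (Int × Int)) (q : List (Int × Int)) (mins : PySem.Dict Int Int),
    (∀ p ∈ adj, Adj edges v p.2 p.1) → RInv edges vis1 q mins →
    RInv edges vis1 (adj.foldl (pvRelaxA cost vis1) (q, mins)).1
      (adj.foldl (pvRelaxA cost vis1) (q, mins)).2 ∧
    (∀ x m0, mins.get? x = some m0 →
      ∃ m, (adj.foldl (pvRelaxA cost vis1) (q, mins)).2.get? x = some m ∧ m ≤ m0) ∧
    (∀ p ∈ adj, p.2 ∈ vis1 ∨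
      ∃ m, (adj.foldl (pvRelaxA cost vis1) (q, mins)).2.get? p.2 = some m ∧ m ≤ max cost p.1) ∧
    ((adj.foldl (pvRelaxA cost vis1) (q, mins)).1.length +
        Phi edges vis1 (adj.foldl (pvRelaxA cost vis1) (q, mins)).2 ≤
      q.length + Phi edges vis1 mins) := by
  intro adj
  induction adj with
  | nil =>
    intro q mins _ hR
    exact ⟨hR, fun x m0 hm0 => ⟨m0, hm0, le_refl _⟩, by simp, le_refl _⟩
  | cons p t ih =>
    intro q mins hadj hR
    have hadjp : Adj edges v p.2 p.1 := hadj p List.mem_cons_self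
    have hadjt : ∀ x ∈ t, Adj edges v x.2 x.1 := fun x hx => hadj x (List.mem_cons_of_mem _ hx)
    simp only [List.foldl_cons]
    rcases relaxA_step q mins p with ⟨hid, hhead⟩ | ⟨hpush, hnot, hcond⟩
    · rw [hid]
      obtain ⟨hR', hmono, hdone, hmeas⟩ := ih q mins hadjt hR
      refine ⟨hR', hmono, ?_, hmeas⟩
      intro x hx
      rcases List.mem_cons.1 hx with rfl | hx
      · rcases hhead with h | ⟨m, hm, hle⟩
        · exact Or.inl h
        · obtain ⟨m', hm', hle'⟩ := hmono _ _ hm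
          exact Or.inr ⟨m', hm', by omega⟩
      · exact hdone x hx
    · rw [hpush]
      have hnxtV : max cost p.1 ∈ Vals edges := by
        rcases max_choice cost p.1 with h | h <;> rw [h]
        · exact hcostV
        · exact adj_fee_mem hadjp
      have hWnxt : W edges p.2 (max cost p.1) := W.step hWv hadjp
      have hR1 : RInv edges vis1 (q ++ [(max cost p.1, p.2)])
          (mins.insert p.2 (max cost p.1)) := by
        constructor
        · intro r hr
          rcases List.mem_append.1 hr with hr | hr
          · exact hR.qW r hr
          · rw [List.mem_singleton.1 hr]; exact hWnxt
        · intro r hr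
          rcases List.mem_append.1 hr with hr | hr
          · exact hR.qV r hr
          · rw [List.mem_singleton.1 hr]; exact hnxtV
        · intro r hr
          rcases List.mem_append.1 hr with hr | hr
          · exact hR.qC r hr
          · rw [List.mem_singleton.1 hr]; exact adj_mem_cands hadjp
        · intro x m hm
          rw [PySem.Dict.get?_insert] at hm
          split at hm
          · rename_i h; cases hm; rw [h]; exact hWnxt
          · exact hR.mW x m hm
        · intro x m hm
          rw [PySem.Dict.get?_insert] at hm
          split at hm
          · cases hm; exact hnxtV
          · exact hR.mV x m hm
        · intro x m hx hm
          rw [PySem.Dict.get?_insert] at hm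
          split at hm
          · rename_i h; cases hm; rw [h]; exact List.mem_append_right _ (by simp)
          · exact List.mem_append_left _ (hR.curr x m hx hm)
      obtain ⟨hR', hmono, hdone, hmeas⟩ := ih _ _ hadjt hR1
      have hstepmono : ∀ x m0, mins.get? x = some m0 →
          ∃ m, (mins.insert p.2 (max cost p.1)).get? x = some m ∧ m ≤ m0 := by
        intro x m0 hm0
        by_cases hx : x = p.2
        · subst hx
          exact ⟨max cost p.1, PySem.Dict.get?_insert_self _ _ _,
            le_of_lt (hcond m0 hm0)⟩
        · exact ⟨m0, by rw [PySem.Dict.get?_insert, if_neg hx]; exact hm0, le_refl _⟩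
      refine ⟨hR', ?_, ?_, ?_⟩
      · intro x m0 hm0
        obtain ⟨m1, hm1, hle1⟩ := hstepmono x m0 hm0
        obtain ⟨m, hm, hle⟩ := hmono x m1 hm1
        exact ⟨m, hm, by omega⟩
      · intro x hx
        rcases List.mem_cons.1 hx with rfl | hx
        · obtain ⟨m, hm, hle⟩ := hmono x.2 (max cost x.1)
            (PySem.Dict.get?_insert_self _ _ _)
          exact Or.inr ⟨m, hm, hle⟩
        · exact hdone x hx
      · have hphi : Phi edges vis1 (mins.insert p.2 (max cost p.1)) < Phi edges vis1 mins :=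
          Phi_insert_lt (adj_mem_cands hadjp) hnot hnxtV hcond
        have hlen : (q ++ [(max cost p.1, p.2)]).length = q.length + 1 := by simp
        omega

theorem pvALoop_succ (graph : PySem.Dict Int (List (Int × Int))) (n : Int) (k : Nat)
    (q : List (Int × Int)) (visited : PySem.Set Int) (mins : PySem.Dict Int Int) :
    pvALoop graph n (k+1) q visited mins =
      match PySem.List.min2? q (fun p => p.1) (fun p => p.2) with
      | none => -1
      | some cv =>
        let q1 := (PySem.List.remove? q cv).getD []
        if visited.contains cv.2 then pvALoop graph n k q1 visited mins
        else
          let visited1 := visited.add cv.2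
          if cv.2 = n - 1 then cv.1
          else
            let st := (graph.getD cv.2 []).foldl (pvRelaxA cv.1 visited1) (q1, mins)
            pvALoop graph n k st.1 visited1 st.2 := rfl

theorem aLoop_go {edges : List (Int × Int × Int)} {n : Int} :
    ∀ (fuel : Nat) (q : List (Int × Int)) (vis : PySem.Set Int) (mins : PySem.Dict Int Int),
    InvA edges n q vis mins → q.length + Phi edges vis mins < fuel →
    Answers edges n (pvALoop (pvBuildGraph edges) n fuel q vis mins) := by
  intro fuel
  induction fuel with
  | zero => intro q vis mins _ h; omega
  | succ k ih =>
    intro q vis mins inv hfuel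
    rcases hmin : PySem.List.min2? q (fun p => p.1) (fun p => p.2) with _ | cv
    · have hq : q = [] := (min2?_props q).1 hmin
      have hstep : pvALoop (pvBuildGraph edges) n (k+1) q vis mins = -1 := by
        rw [pvALoop_succ]
        simp only [hmin]
      rw [hstep]
      exact Or.inr ⟨no_walk (hq ▸ inv), rfl⟩
    · obtain ⟨hcvq, hcvmin⟩ := (min2?_props q).2 cv hmin
      have hq1 : (PySem.List.remove? q cv).getD [] = q.erase cv := remove?_erase hcvq
      have hqpos : 0 < q.length := List.length_pos_of_mem hcvq
      have hqlen : (q.erase cv).length = q.length - 1 := by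
        rw [List.length_erase, if_pos hcvq]
      cases hvis : vis.contains cv.2 with
      | true =>
        have hcv2vis : cv.2 ∈ vis := (PySem.Set.contains_iff _ _).1 hvis
        have hstep : pvALoop (pvBuildGraph edges) n (k+1) q vis mins =
            pvALoop (pvBuildGraph edges) n k (q.erase cv) vis mins := by
          rw [pvALoop_succ]
          simp only [hmin, hq1, hvis, if_true]
        rw [hstep]
        apply ih
        · constructor
          · exact fun p hp => inv.qW p (List.erase_sublist.subset hp)
          · exact fun p hp => inv.qV p (List.erase_sublist.subset hp)
          · exact fun p hp => inv.qC p (List.erase_sublist.subset hp)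
          · exact inv.mW
          · exact inv.mV
          · intro x m hx hm
            have hne : (m, x) ≠ cv := by
              intro h
              rw [← h] at hcv2vis
              exact hx hcv2vis
            exact (List.mem_erase_of_ne hne).2 (inv.curr x m hx hm)
          · exact inv.visW
          · exact inv.start
          · exact inv.tgt
        · omega
      | false =>
        have hcv2 : cv.2 ∉ vis := by
          intro h
          rw [(PySem.Set.contains_iff _ _).2 h] at hvis
          cases hvis
        have hWcv : W edges cv.2 cv.1 := inv.qW cv hcvq
        have hmin_v : ∀ c, W edges cv.2 c → cv.1 ≤ c := by
          intro c hc
          rcases covering inv hc with h | ⟨x, m, hx, hgm, hmle⟩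
          · exact absurd h hcv2
          · have := hcvmin (m, x) (inv.curr x m hx hgm)
            simp at this
            omega
        by_cases htgt : cv.2 = n - 1
        · have hstep : pvALoop (pvBuildGraph edges) n (k+1) q vis mins = cv.1 := by
            rw [pvALoop_succ]
            simp only [hmin, hq1, hvis, Bool.false_eq_true, if_false, if_pos htgt]
          rw [hstep]
          exact Or.inl ⟨htgt ▸ hWcv, htgt ▸ hmin_v⟩
        · have hstep : pvALoop (pvBuildGraph edges) n (k+1) q vis mins =
              pvALoop (pvBuildGraph edges) n k
                (((pvBuildGraph edges).getD cv.2 []).foldl (pvRelaxA cv.1 (vis.add cv.2))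
                  (q.erase cv, mins)).1
                (vis.add cv.2)
                (((pvBuildGraph edges).getD cv.2 []).foldl (pvRelaxA cv.1 (vis.add cv.2))
                  (q.erase cv, mins)).2 := by
            rw [pvALoop_succ]
            simp only [hmin, hq1, hvis, Bool.false_eq_true, if_false, if_neg htgt]
          rw [hstep]
          have hR : RInv edges (vis.add cv.2) (q.erase cv) mins := by
            constructor
            · exact fun p hp => inv.qW p (List.erase_sublist.subset hp)
            · exact fun p hp => inv.qV p (List.erase_sublist.subset hp)
            · exact fun p hp => inv.qC p (List.erase_sublist.subset hp)
            · exact inv.mW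
            · exact inv.mV
            · intro x m hx hm
              have hxv : x ∉ vis := fun h => hx ((PySem.Set.mem_add _ _ _).2 (Or.inl h))
              have hxne : x ≠ cv.2 := fun h => hx ((PySem.Set.mem_add _ _ _).2 (Or.inr h))
              have hne : (m, x) ≠ cv := by
                intro h
                exact hxne (by rw [← h])
              exact (List.mem_erase_of_ne hne).2 (inv.curr x m hxv hm)
          obtain ⟨hR', hmono, hdone, hmeas⟩ :=
            relaxA_fold (vis1 := vis.add cv.2) hWcv (inv.qV cv hcvq)
              ((pvBuildGraph edges).getD cv.2 []) (q.erase cv) mins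
              (fun p hp => mem_graph.1 hp) hR
          apply ih
          · constructor
            · exact hR'.qW
            · exact hR'.qV
            · exact hR'.qC
            · exact hR'.mW
            · exact hR'.mV
            · exact hR'.curr
            · intro u hu
              rcases (PySem.Set.mem_add _ _ _).1 hu with hu' | rfl
              · obtain ⟨du, h1, h2, h3⟩ := inv.visW u hu'
                refine ⟨du, h1, h2, ?_⟩
                intro x f hadjx
                rcases h3 x f hadjx with h | ⟨m, hm, hle⟩
                · exact Or.inl ((PySem.Set.mem_add _ _ _).2 (Or.inl h))
                · obtain ⟨m', hm', hle'⟩ := hmono x m hm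
                  exact Or.inr ⟨m', hm', by omega⟩
              · refine ⟨cv.1, hWcv, hmin_v, ?_⟩
                intro x f hadjx
                have hmem : ((f, x) : Int × Int) ∈ (pvBuildGraph edges).getD cv.2 [] :=
                  mem_graph.2 hadjx
                rcases hdone (f, x) hmem with h | ⟨m, hm, hle⟩
                · exact Or.inl h
                · exact Or.inr ⟨m, hm, hle⟩
            · rcases inv.start with h | h
              · exact Or.inl ((PySem.Set.mem_add _ _ _).2 (Or.inl h))
              · obtain ⟨m, hm, hle⟩ := hmono 0 0 h
                have : 0 ≤ m := W_nonneg (hR'.mW 0 m hm)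
                have hm0 : m = 0 := by omega
                exact Or.inr (hm0 ▸ hm)
            · intro h
              rcases (PySem.Set.mem_add _ _ _).1 h with h' | h'
              · exact inv.tgt h'
              · exact htgt h'.symm
          · have hPhi : Phi edges (vis.add cv.2) mins ≤ Phi edges vis mins :=
              Phi_addvis_le edges vis mins cv.2
            omega

theorem initA_inv (edges : List (Int × Int × Int)) (n : Int) :
    InvA edges n [((0:Int), (0:Int))] PySem.Set.empty (PySem.Dict.ofList [((0:Int), (0:Int))]) := by
  constructor
  · intro p hp
    rw [List.mem_singleton.1 hp]
    exact W.zero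
  · intro p hp
    rw [List.mem_singleton.1 hp]
    exact zero_mem_Vals edges
  · intro p hp
    rw [List.mem_singleton.1 hp]
    exact zero_mem_cands edges
  · intro x m hm
    rw [dict_init_get?] at hm
    split at hm
    · rename_i h; cases hm; rw [h]; exact W.zero
    · cases hm
  · intro x m hm
    rw [dict_init_get?] at hm
    split at hm
    · cases hm; exact zero_mem_Vals edges
    · cases hm
  · intro x m _ hm
    rw [dict_init_get?] at hm
    split at hm
    · rename_i h; cases hm; rw [h]; exact List.mem_singleton.2 rfl
    · cases hm
  · intro u hu
    exact absurd hu List.not_mem_nil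
  · exact Or.inr (by rw [dict_init_get?, if_pos rfl])
  · exact List.not_mem_nil

theorem ferry_cost_answers (edges : List (Int × Int × Int)) (n : Int) :
    Answers edges n (ferry_cost edges n) := by
  have h0 : ferry_cost edges n =
      pvALoop (pvBuildGraph edges) n ((2 * edges.length + 1) * (edges.length + 1) + 2)
        [((0:Int), (0:Int))] PySem.Set.empty (PySem.Dict.ofList [((0:Int), (0:Int))]) := rfl
  rw [h0]
  apply aLoop_go _ _ _ _ (initA_inv edges n)
  have := Phi_le edges PySem.Set.empty (PySem.Dict.ofList [((0:Int), (0:Int))])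
  simp only [List.length_singleton]
  omega


-- ===== VERDICT (by name: the statement is the Claim_ definition above) =====
theorem ferry_cost_spec : Claim_equal_ferry_cost := by
  intro edges n _
  exact answers_unique (ferry_cost_answers edges n) (ferry_cost_alt_answers edges n)
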